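-- pv_equiv track=rewrite | github.com/achoruzy/ProjectEuler | 0061_Cyclical_figurate_numbers.py | pentagonal_gen
-- ===== SOURCE A (Python) =====
-- def pentagonal_gen(start: int, stop: int) -> int:
--     num = 1
--     result = 0
--     while result <= stop:
--         result = (num * (3 * num - 1)) // 2
--         if stop >= result >= start:
--             yield result
--         num += 1
-- ===== SOURCE B (Python) =====
-- def pentagonal_gen(start: int, stop: int) -> int:
--     # Two-phase additive generator: seek to the range with the difference
--     # recurrence p(n+1) = p(n) + (3n+1), then emit; no multiplication,
--     # division or per-iteration membership test.
--     p, d = 1, 4          # p(1) = 1, next difference 3*1 + 1 = 4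
--     while p < start:     # seek: skip pentagonals below the range
--         p += d
--         d += 3
--     while p <= stop:     # emit: every value here is already >= start
--         yield p
--         p += d
--         d += 3
-- ===== Notes on version B (the rewrite author's own statement) =====
-- stated objective: alternative
-- what changed: Replaces the scan-from-1 loop with per-iteration multiplication, floor division and a range-membership guard by a two-phase additive generator: seek past values below start and then emit values up to stop, maintaining the pentagonal value and its difference (p += d; d += 3) with no multiplication, division or membership test.
import Mathlib
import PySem

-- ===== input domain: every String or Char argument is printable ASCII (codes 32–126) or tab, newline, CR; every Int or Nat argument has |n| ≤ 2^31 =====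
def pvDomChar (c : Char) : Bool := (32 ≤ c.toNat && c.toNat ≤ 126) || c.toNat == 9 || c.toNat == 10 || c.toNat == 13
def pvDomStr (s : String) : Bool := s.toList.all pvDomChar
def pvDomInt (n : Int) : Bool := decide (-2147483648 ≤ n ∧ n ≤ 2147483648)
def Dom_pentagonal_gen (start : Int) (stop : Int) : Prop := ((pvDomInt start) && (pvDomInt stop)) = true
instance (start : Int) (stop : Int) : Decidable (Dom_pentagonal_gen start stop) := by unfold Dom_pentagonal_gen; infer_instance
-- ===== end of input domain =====

-- B replaces A's scan-from-1 with membership guard by a two-phase additive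
-- generator (seek below start, then emit up to stop, maintaining value and
-- difference); objective: alternative algorithm, same asymptotic cost.
-- Both ports collect the generator's yields into a list.

-- ===== PORT A =====
-- A's while loop, fueled: the loop runs while the previous `result` ≤ stop;
-- fuel stop.toNat + 2 is proved sufficient (the guard only totalizes the loop).
def pvLoopA (start : Int) (stop : Int) : Nat → Int → Int → List Int
  | 0, _, _ => []
  | fuel+1, num, result =>
    if result ≤ stop then
      let r := PySem.Int.floordiv (num * (3 * num - 1)) 2
      (if stop ≥ r ∧ r ≥ start then [r] else []) ++ pvLoopA start stop fuel (num + 1) r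
    else []

def pentagonal_gen (start : Int) (stop : Int) : List Int :=
  pvLoopA start stop (stop.toNat + 2) 1 0

-- ===== PORT B =====
-- seek phase: while p < start: p += d; d += 3   (fueled; fuel proved sufficient)
def pvSeekB (start : Int) : Nat → Int × Int → Int × Int
  | 0, pd => pd
  | fuel+1, (p, d) => if p < start then pvSeekB start fuel (p + d, d + 3) else (p, d)

-- emit phase: while p <= stop: yield p; p += d; d += 3
def pvEmitB (stop : Int) : Nat → Int × Int → List Int
  | 0, _ => []
  | fuel+1, (p, d) => if p ≤ stop then p :: pvEmitB stop fuel (p + d, d + 3) else []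

def pentagonal_gen_alt (start : Int) (stop : Int) : List Int :=
  pvEmitB stop (stop.toNat + 1) (pvSeekB start start.toNat (1, 4))

-- ===== PRECONDITION & SPEC =====
def Spec_pentagonal_gen (start : Int) (stop : Int) (out : List Int) : Prop := out = pentagonal_gen_alt start stop
instance (start : Int) (stop : Int) (out : List Int) : Decidable (Spec_pentagonal_gen start stop out) := by unfold Spec_pentagonal_gen; infer_instance

-- ===== CLAIM (what is proved, stated in full; the proofs are below) =====
def Claim_equal_pentagonal_gen : Prop := ∀ (start : Int) (stop : Int), Dom_pentagonal_gen start stop → Spec_pentagonal_gen start stop (pentagonal_gen start stop)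

-- ===== LEMMAS AND PROOFS =====

-- one-step unfolding lemmas for the fueled loops (rfl; used to rewrite exactly once)
theorem pvLoopA_succ (start stop : Int) (f : Nat) (num result : Int) :
    pvLoopA start stop (f + 1) num result =
      if result ≤ stop then
        (if stop ≥ PySem.Int.floordiv (num * (3 * num - 1)) 2 ∧
            PySem.Int.floordiv (num * (3 * num - 1)) 2 ≥ start then
          [PySem.Int.floordiv (num * (3 * num - 1)) 2] else []) ++
        pvLoopA start stop f (num + 1) (PySem.Int.floordiv (num * (3 * num - 1)) 2)
      else [] := rfl

theorem pvSeekB_succ (start : Int) (f : Nat) (p d : Int) :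
    pvSeekB start (f + 1) (p, d) =
      if p < start then pvSeekB start f (p + d, d + 3) else (p, d) := rfl

theorem pvEmitB_succ (stop : Int) (f : Nat) (p d : Int) :
    pvEmitB stop (f + 1) (p, d) =
      if p ≤ stop then p :: pvEmitB stop f (p + d, d + 3) else [] := rfl

-- pentagonal numbers, additively
def pvPent : Nat → Int
  | 0 => 0
  | k+1 => pvPent k + (3 * k + 1)

theorem pvPent_succ (k : Nat) : pvPent (k + 1) = pvPent k + (3 * (k : Int) + 1) := by
  simp [pvPent]

theorem pvPent_two_mul (k : Nat) : (k : Int) * (3 * k - 1) = 2 * pvPent k := by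
  induction k with
  | zero => simp [pvPent]
  | succ k ih => rw [pvPent_succ]; push_cast; push_cast at ih; linear_combination ih

theorem pvPent_floordiv (k : Nat) :
    PySem.Int.floordiv ((k : Int) * (3 * (k : Int) - 1)) 2 = pvPent k := by
  rw [PySem.Int.floordiv_eq_ediv_of_pos (by norm_num), pvPent_two_mul]
  exact Int.mul_ediv_cancel_left _ (by norm_num)

theorem pvPent_floordiv' (k : Nat) :
    PySem.Int.floordiv (((k : Int) + 1) * (3 * ((k : Int) + 1) - 1)) 2 = pvPent (k + 1) := by
  have := pvPent_floordiv (k + 1); push_cast at this; exact this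

theorem pvPent_lt_succ (k : Nat) : pvPent k < pvPent (k + 1) := by
  rw [pvPent_succ]; have : (0:Int) ≤ (k:Int) := Int.natCast_nonneg k; omega

theorem pvPent_strictMono : StrictMono pvPent :=
  strictMono_nat_of_lt_succ pvPent_lt_succ

theorem pvPent_ge (k : Nat) : (k : Int) ≤ pvPent k := by
  induction k with
  | zero => simp [pvPent]
  | succ k ih => rw [pvPent_succ]; push_cast; omega

-- the first index n ≥ 1 with pvPent n ≥ start exists
theorem pvN0_exists (start : Int) : ∃ n : Nat, 1 ≤ n ∧ start ≤ pvPent n := by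
  refine ⟨max 1 start.toNat, le_max_left _ _, ?_⟩
  have h1 : start ≤ ((max 1 start.toNat : Nat) : Int) := by
    have h2 : start ≤ (start.toNat : Int) := Int.self_le_toNat start
    have h3 : (start.toNat : Int) ≤ ((max 1 start.toNat : Nat) : Int) :=
      Nat.cast_le.mpr (le_max_right 1 start.toNat)
    omega
  exact le_trans h1 (pvPent_ge _)

def pvN0 (start : Int) : Nat := Nat.find (pvN0_exists start)

theorem pvN0_one_le (start : Int) : 1 ≤ pvN0 start := (Nat.find_spec (pvN0_exists start)).1

theorem pvN0_ge (start : Int) : start ≤ pvPent (pvN0 start) := (Nat.find_spec (pvN0_exists start)).2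

theorem pvN0_min (start : Int) (k : Nat) (h1 : 1 ≤ k) (h2 : start ≤ pvPent k) : pvN0 start ≤ k :=
  Nat.find_le ⟨h1, h2⟩

theorem pvN0_lt_not (start : Int) (k : Nat) (h1 : 1 ≤ k) (hk : k < pvN0 start) :
    pvPent k < start := by
  by_contra h
  exact absurd (pvN0_min start k h1 (by omega)) (by omega)

theorem pvN0_ub (start : Int) : pvN0 start ≤ start.toNat + 1 := by
  have h1 : start ≤ pvPent (max 1 start.toNat) := (by
    have h2 : start ≤ (start.toNat : Int) := Int.self_le_toNat start
    have h3 : (start.toNat : Int) ≤ ((max 1 start.toNat : Nat) : Int) :=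
      Nat.cast_le.mpr (le_max_right 1 start.toNat)
    exact le_trans (by omega) (pvPent_ge _))
  have := pvN0_min start (max 1 start.toNat) (le_max_left _ _) h1
  omega

-- the reference emission list
def pvE (stop : Int) : Nat → Nat → List Int
  | 0, _ => []
  | f+1, n => if pvPent n ≤ stop then pvPent n :: pvE stop f (n + 1) else []

theorem pvE_succ (stop : Int) (f n : Nat) :
    pvE stop (f + 1) n = if pvPent n ≤ stop then pvPent n :: pvE stop f (n + 1) else [] := rfl

theorem pvE_nil (stop : Int) (f n : Nat) (h : stop < pvPent n) : pvE stop f n = [] := by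
  cases f with
  | zero => rfl
  | succ f => rw [pvE_succ, if_neg (not_le.mpr h)]

theorem pvE_congr (stop : Int) (f₁ f₂ n : Nat) (h₁ : stop.toNat < f₁ + n)
    (h₂ : stop.toNat < f₂ + n) : pvE stop f₁ n = pvE stop f₂ n := by
  induction f₁ generalizing f₂ n with
  | zero =>
    have hn : stop < pvPent n := by
      have := pvPent_ge n; have := Int.self_le_toNat stop; omega
    rw [pvE_nil stop f₂ n hn]; rfl
  | succ f₁ ih =>
    cases f₂ with
    | zero =>
      have hn : stop < pvPent n := by
        have := pvPent_ge n; have := Int.self_le_toNat stop; omega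
      rw [pvE_nil stop (f₁+1) n hn]; rfl
    | succ f₂ =>
      by_cases hp : pvPent n ≤ stop
      · have hn : n ≤ stop.toNat := by have := pvPent_ge n; omega
        rw [pvE_succ, pvE_succ, if_pos hp, if_pos hp, ih f₂ (n+1) (by omega) (by omega)]
      · rw [pvE_succ, pvE_succ, if_neg hp, if_neg hp]

theorem pvLoopA_dead (start stop : Int) (f : Nat) (num r : Int) (h : stop < r) :
    pvLoopA start stop f num r = [] := by
  cases f with
  | zero => rfl
  | succ f => rw [pvLoopA_succ, if_neg (not_le.mpr h)]

-- emit phase of A: once start ≤ pvPent (k+1), the start guard always passes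
theorem pvA_emit (start stop : Int) (f k : Nat) (hs : start ≤ pvPent (k + 1))
    (hf : stop.toNat < f + (k + 1)) :
    pvLoopA start stop (f + 1) ((k : Int) + 1) (pvPent k) = pvE stop f (k + 1) := by
  induction f generalizing k with
  | zero =>
    have hp : stop < pvPent (k + 1) := by
      have h1 := pvPent_ge (k + 1); have h2 := Int.self_le_toNat stop
      push_cast at h1; omega
    rw [pvLoopA_succ, pvPent_floordiv' k]
    by_cases hk : pvPent k ≤ stop
    · rw [if_pos hk, if_neg (by push_neg; intro h; omega)]
      rfl
    · rw [if_neg hk]; rfl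
  | succ f ih =>
    by_cases hk : pvPent k ≤ stop
    · rw [pvLoopA_succ, if_pos hk, pvPent_floordiv' k]
      by_cases hp : pvPent (k + 1) ≤ stop
      · have hstep : start ≤ pvPent (k + 1 + 1) := le_trans hs (le_of_lt (pvPent_lt_succ (k + 1)))
        have hn : k + 1 ≤ stop.toNat := by have := pvPent_ge (k + 1); omega
        have hrec := ih (k + 1) hstep (by omega)
        push_cast at hrec
        rw [if_pos ⟨hp, hs⟩, pvE_succ, if_pos hp]
        rw [show (k : Int) + 1 + 1 = ((k : Int) + 1) + 1 from rfl] at hrec ⊢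
        rw [hrec]; rfl
      · rw [if_neg (by push_neg; intro h; omega)]
        rw [pvLoopA_dead start stop (f + 1) _ _ (not_le.mp hp)]
        rw [pvE_nil stop (f + 1) (k + 1) (not_le.mp hp)]
        rfl
    · have hp : stop < pvPent (k + 1) := lt_of_lt_of_le (not_le.mp hk) (le_of_lt (pvPent_lt_succ k))
      rw [pvLoopA_succ, if_neg hk, pvE_nil stop (f + 1) (k + 1) hp]

-- seek phase of A: from any k ≤ n0 the loop yields nothing until n0
theorem pvA_seek (start stop : Int) (f k : Nat) (h1 : 1 ≤ k) (h2 : k ≤ pvN0 start)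
    (hf : stop.toNat + 2 ≤ f + k) :
    pvLoopA start stop f (k : Int) (pvPent (k - 1)) = pvE stop (stop.toNat + 1) (pvN0 start) := by
  induction f generalizing k with
  | zero =>
    have hp : stop < pvPent (pvN0 start) := by
      have h3 : (k : Int) ≤ pvPent k := pvPent_ge k
      have h4 : pvPent k ≤ pvPent (pvN0 start) := pvPent_strictMono.monotone h2
      have := Int.self_le_toNat stop; omega
    rw [pvE_nil stop _ _ hp]; rfl
  | succ f ih =>
    rcases eq_or_lt_of_le h2 with heq | hlt
    · -- k = n0: hand over to the emit lemma
      obtain ⟨k', hk'⟩ : ∃ k', k = k' + 1 := ⟨k - 1, by omega⟩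
      subst hk'
      have hs : start ≤ pvPent (k' + 1) := heq ▸ pvN0_ge start
      have hrec := pvA_emit start stop f k' hs (by omega)
      simp only [Nat.add_sub_cancel]
      push_cast
      rw [hrec, ← heq]
      exact pvE_congr stop f (stop.toNat + 1) (k' + 1) (by omega) (by omega)
    · -- k < n0: this iteration yields nothing
      have hklt : pvPent k < start := pvN0_lt_not start k h1 hlt
      rw [pvLoopA_succ, pvPent_floordiv k]
      by_cases hk : pvPent (k - 1) ≤ stop
      · have hrec : pvLoopA start stop f ((k : Int) + 1) (pvPent k)
            = pvE stop (stop.toNat + 1) (pvN0 start) := by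
          have := ih (k + 1) (by omega) (by omega) (by omega)
          simp only [Nat.add_sub_cancel] at this
          push_cast at this
          exact this
        rw [if_pos hk, if_neg (by push_neg; intro h; omega), hrec]
        rfl
      · have hp : stop < pvPent (pvN0 start) := by
          have h4 : pvPent (k - 1) ≤ pvPent (pvN0 start) := pvPent_strictMono.monotone (by omega)
          omega
        rw [if_neg hk, pvE_nil stop _ _ hp]

-- B's seek phase reaches exactly (pvPent n0, 3*n0+1)
theorem pvB_seek (start : Int) (f k : Nat) (h1 : 1 ≤ k) (h2 : k ≤ pvN0 start)
    (hf : pvN0 start ≤ f + k) :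
    pvSeekB start f (pvPent k, 3 * (k : Int) + 1)
      = (pvPent (pvN0 start), 3 * (pvN0 start : Int) + 1) := by
  induction f generalizing k with
  | zero =>
    have : k = pvN0 start := by omega
    subst this; rfl
  | succ f ih =>
    rcases eq_or_lt_of_le h2 with heq | hlt
    · rw [pvSeekB_succ, if_neg (not_lt.mpr (heq ▸ pvN0_ge start)), heq]
    · have hklt : pvPent k < start := pvN0_lt_not start k h1 hlt
      rw [pvSeekB_succ, if_pos hklt]
      have hfst : pvPent k + (3 * (k : Int) + 1) = pvPent (k + 1) := (pvPent_succ k).symm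
      have hsnd : 3 * (k : Int) + 1 + 3 = 3 * ((k + 1 : Nat) : Int) + 1 := by push_cast; ring
      rw [hfst, hsnd]
      have := ih (k + 1) (by omega) (by omega) (by omega)
      exact this

-- B's emit phase produces the reference list
theorem pvB_emit (stop : Int) (f n : Nat) (hf : stop.toNat < f + n) :
    pvEmitB stop (f + 1) (pvPent n, 3 * (n : Int) + 1) = pvE stop f n := by
  induction f generalizing n with
  | zero =>
    have hp : ¬ pvPent n ≤ stop := by
      have := pvPent_ge n; have := Int.self_le_toNat stop; omega
    rw [pvEmitB_succ, if_neg hp]; rfl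
  | succ f ih =>
    by_cases hp : pvPent n ≤ stop
    · have hn : n ≤ stop.toNat := by have := pvPent_ge n; omega
      rw [pvEmitB_succ, if_pos hp]
      have hfst : pvPent n + (3 * (n : Int) + 1) = pvPent (n + 1) := (pvPent_succ n).symm
      have hsnd : 3 * (n : Int) + 1 + 3 = 3 * ((n + 1 : Nat) : Int) + 1 := by push_cast; ring
      rw [hfst, hsnd, ih (n + 1) (by omega), pvE_succ, if_pos hp]
    · rw [pvEmitB_succ, if_neg hp, pvE_nil stop (f + 1) n (not_le.mp hp)]

-- ===== VERDICT (by name: the statement is the Claim_ definition above) =====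
theorem pentagonal_gen_spec : Claim_equal_pentagonal_gen := by
  unfold Claim_equal_pentagonal_gen
  intro start stop _
  unfold Spec_pentagonal_gen pentagonal_gen pentagonal_gen_alt
  have hA : pvLoopA start stop (stop.toNat + 2) (1 : Int) 0
      = pvE stop (stop.toNat + 1) (pvN0 start) := by
    have h := pvA_seek start stop (stop.toNat + 2) 1 (by omega) (pvN0_one_le start) (by omega)
    simpa [pvPent] using h
  have hSeek : pvSeekB start start.toNat (1, 4)
      = (pvPent (pvN0 start), 3 * (pvN0 start : Int) + 1) := by
    have h := pvB_seek start start.toNat 1 (by omega) (pvN0_one_le start)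
      (by have := pvN0_ub start; omega)
    have h1 : pvPent 1 = 1 := by simp [pvPent]
    rw [h1] at h
    norm_num at h ⊢
    exact h
  have hB : pvEmitB stop (stop.toNat + 1) (pvSeekB start start.toNat (1, 4))
      = pvE stop (stop.toNat) (pvN0 start) := by
    rw [hSeek]
    exact pvB_emit stop stop.toNat (pvN0 start) (by have := pvN0_one_le start; omega)
  rw [hA, hB]
  exact pvE_congr stop (stop.toNat + 1) stop.toNat (pvN0 start)
    (by have := pvN0_one_le start; omega) (by have := pvN0_one_le start; omega)
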